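-- pv_equiv track=rewrite | github.com/Aryudesu/ABC | ABS/I.py | calc
-- ===== SOURCE A (Python) =====
-- def is_st_str(S, sl, idx, st):
--     lst = len(st)
--     if idx + lst > sl:
--         return False
--     for i in range(lst):
--         if S[idx + i] != st[i]:
--             return False
--     return True
--
-- def calc(S):
--     SL = len(S)
--     idx = 0
--     dream = "dream"
--     erase = "erase"
--     while idx < SL:
--         if is_st_str(S, SL, idx, dream):
--             idx += 5
--             if idx + 2 <= SL:
--                 if S[idx] == "e" and S[idx + 1] == "r":
--                     if idx + 3 <= SL:
--                         if (S[idx + 2] == "e" or S[idx + 2] == "d"):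
--                             idx += 2
--                     else:
--                         idx += 2
--         elif is_st_str(S, SL, idx, erase):
--             idx += 5
--             if idx + 1 <= SL:
--                 if S[idx] == "r":
--                     idx += 1
--         else:
--             return "NO"
--     return "YES"
-- ===== SOURCE B (Python) =====
-- def calc(S):
--     # Reverse the string; the reversed words form a prefix code, so a
--     # plain greedy front-scan with no lookahead decides decomposability.
--     t = S[::-1]
--     while t:
--         for w in ("resare", "remaerd", "esare", "maerd"):
--             if t.startswith(w):
--                 t = t[len(w):]
--                 break
--         else:
--             return "NO"
--     return "YES"
-- ===== Notes on version B (the rewrite author's own statement) =====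
-- stated objective: simpler
-- what changed: Scans the reversed string greedily matching the four reversed words (which form a prefix code), eliminating A's hand-rolled character matcher and its two-character lookahead branching after the five-letter words.
import Mathlib
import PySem

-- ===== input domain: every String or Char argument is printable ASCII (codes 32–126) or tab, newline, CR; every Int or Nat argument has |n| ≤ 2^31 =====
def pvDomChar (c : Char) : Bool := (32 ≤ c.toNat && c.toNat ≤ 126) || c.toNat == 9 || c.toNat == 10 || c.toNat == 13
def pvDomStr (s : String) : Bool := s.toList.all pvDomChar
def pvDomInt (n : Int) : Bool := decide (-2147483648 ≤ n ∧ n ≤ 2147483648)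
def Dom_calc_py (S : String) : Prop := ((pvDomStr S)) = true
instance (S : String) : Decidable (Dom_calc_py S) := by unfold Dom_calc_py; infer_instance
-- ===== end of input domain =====

-- B scans the reversed string greedily matching the reversed words (a prefix code),
-- replacing A's hand-rolled character matcher and its lookahead after "dream"/"erase": simpler.


-- ===== PORT A =====
-- is_st_str: the range loop with early 'return False' is the Bool `List.all` over the same range.
-- S[idx+i] / st[i] are in range at every call site (idx ≥ 0 and the length guard holds), so
-- PySem.Str.pyGet? is exact there.
def isStStr (S : String) (sl : Int) (idx : Int) (st : String) : Bool :=
  let lst : Int := PySem.Str.len st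
  if idx + lst > sl then false
  else (PySem.List.pyRange 0 lst 1).all
    (fun i => PySem.Str.pyGet? S (idx + i) == PySem.Str.pyGet? st i)

-- the while loop of calc, as recursion on the remaining length SL - idx
def calcLoop (S : String) (SL : Int) (idx : Int) : String :=
  if _h : idx < SL then
    if isStStr S SL idx "dream" then
      -- idx += 5, then the nested lookahead updates (idx1 = idx + 5 inlined)
      calcLoop S SL
        (if idx + 5 + 2 ≤ SL then
          if PySem.Str.pyGet? S (idx + 5) == some 'e' && PySem.Str.pyGet? S (idx + 5 + 1) == some 'r' then
            if idx + 5 + 3 ≤ SL then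
              if PySem.Str.pyGet? S (idx + 5 + 2) == some 'e' || PySem.Str.pyGet? S (idx + 5 + 2) == some 'd' then
                idx + 5 + 2
              else idx + 5
            else idx + 5 + 2
          else idx + 5
        else idx + 5)
    else if isStStr S SL idx "erase" then
      calcLoop S SL
        (if idx + 5 + 1 ≤ SL then
          if PySem.Str.pyGet? S (idx + 5) == some 'r' then idx + 5 + 1 else idx + 5
        else idx + 5)
    else "NO"
  else "YES"
termination_by (SL - idx).toNat
decreasing_by
  · split_ifs <;> omega
  · split_ifs <;> omega

def calc_py (S : String) : String :=
  calcLoop S (PySem.Str.len S) 0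

-- ===== PORT B =====
-- the while/for-else loop of Source B: try each reversed word as a prefix, drop it, else "NO"
def bLoop (t : List Char) : String :=
  if h : t = [] then "YES"
  else if PySem.Chars.startswith t "resare".toList then bLoop (t.drop 6)
  else if PySem.Chars.startswith t "remaerd".toList then bLoop (t.drop 7)
  else if PySem.Chars.startswith t "esare".toList then bLoop (t.drop 5)
  else if PySem.Chars.startswith t "maerd".toList then bLoop (t.drop 5)
  else "NO"
termination_by t.length
decreasing_by all_goals (have hp := List.length_pos_of_ne_nil h; simp; omega)

def calc_py_alt (S : String) : String :=
  -- t = S[::-1]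
  match PySem.List.slice? S.toList none none (-1) with
  | some t => bLoop t
  | none => "NO"   -- unreachable: step -1 ≠ 0

-- ===== PRECONDITION & SPEC =====
def Spec_calc_py (S : String) (out : String) : Prop := out = calc_py_alt S
instance (S : String) (out : String) : Decidable (Spec_calc_py S out) := by unfold Spec_calc_py; infer_instance

-- ===== CLAIM (what is proved, stated in full; the proofs are below) =====
def Claim_equal_calc_py : Prop := ∀ (S : String), Dom_calc_py S → Spec_calc_py S (calc_py S)

-- ===== LEMMAS AND PROOFS =====

-- the four words and decomposability into them
def dreamW : List Char := ['d','r','e','a','m']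
def dreamerW : List Char := ['d','r','e','a','m','e','r']
def eraseW : List Char := ['e','r','a','s','e']
def eraserW : List Char := ['e','r','a','s','e','r']
def pvWords : List (List Char) := [dreamW, dreamerW, eraseW, eraserW]

inductive Decomp : List Char → Prop
  | nil : Decomp []
  | cons (w rest : List Char) : w ∈ pvWords → Decomp rest → Decomp (w ++ rest)

lemma decomp_append_word (X w : List Char) (hw : w ∈ pvWords) (hX : Decomp X) :
    Decomp (X ++ w) := by
  induction hX with
  | nil => simpa using Decomp.cons w [] hw Decomp.nil
  | cons w0 rest h0 _ ih => simpa [List.append_assoc] using Decomp.cons w0 (rest ++ w) h0 ih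

lemma decomp_rev_inversion (L : List Char) (hL : Decomp L) (hne : L ≠ []) :
    ∃ X w, w ∈ pvWords ∧ L = X ++ w ∧ Decomp X := by
  induction hL with
  | nil => exact absurd rfl hne
  | cons w0 rest h0 hrest ih =>
    rcases rest with _ | _
    · exact ⟨[], w0, h0, by simp, Decomp.nil⟩
    · obtain ⟨X, w, hw, hX, hdX⟩ := ih (by simp)
      exact ⟨w0 ++ X, w, hw, by simp [hX, List.append_assoc], Decomp.cons _ _ h0 hdX⟩

-- prefix toolkit
lemma pfx_get {L w : List Char} {k i : Nat} (h : w <+: L.drop k) (hi : i < w.length) :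
    L[k + i]? = some (w[i]'hi) := by
  have := List.prefix_iff_getElem?.mp h i hi
  rwa [List.getElem?_drop] at this

lemma drop_word {L w : List Char} {k : Nat} (hw : w ≠ []) (h : w <+: L.drop k) :
    L.drop k = w ++ L.drop (k + w.length) ∧ k + w.length ≤ L.length := by
  obtain ⟨t, ht⟩ := h
  have hlen : w.length + t.length = L.length - k := by
    have := congrArg List.length ht; simpa using this
  have hk : k ≤ L.length := by
    by_contra hc
    push_neg at hc
    rw [List.drop_eq_nil_of_le (le_of_lt hc)] at ht
    rcases List.append_eq_nil_iff.mp ht with ⟨h1, _⟩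
    exact hw h1
  have hwl : 0 < w.length := List.length_pos_of_ne_nil hw
  refine ⟨?_, by omega⟩
  have h2 : (L.drop k).drop w.length = L.drop (k + w.length) := by rw [List.drop_drop]
  rw [← h2, ← ht, List.drop_left]

lemma snoc_prefix {L w : List Char} {k : Nat} {c : Char} (h : w <+: L.drop k)
    (hc : L[k + w.length]? = some c) : (w ++ [c]) <+: L.drop k := by
  rw [List.prefix_iff_getElem?] at h ⊢
  intro i hi
  rcases Nat.lt_or_ge i w.length with hlt | hge
  · have h1 := h i hlt
    have h2 : (w ++ [c])[i]'(by simp; omega) = w[i]'hlt := List.getElem_append_left hlt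
    rw [h1, h2]
  · have hi' : i = w.length := by
      simp only [List.length_append, List.length_singleton] at hi; omega
    subst hi'
    rw [List.getElem?_drop, hc]
    simp

lemma decomp_head {M : List Char} (h : Decomp M) (hne : M ≠ []) :
    ∃ w, w ∈ pvWords ∧ w <+: M ∧ Decomp (M.drop w.length) := by
  cases h with
  | nil => exact absurd rfl hne
  | cons w rest hw hrest =>
    exact ⟨w, hw, List.prefix_append w rest, by rwa [List.drop_left]⟩

lemma decomp_head_at {L : List Char} {k : Nat} (h : Decomp (L.drop k)) (hne : L.drop k ≠ []) :
    ∃ w, w ∈ pvWords ∧ w <+: L.drop k ∧ Decomp (L.drop (k + w.length)) := by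
  obtain ⟨w, hw, hpre, hrest⟩ := decomp_head h hne
  refine ⟨w, hw, hpre, ?_⟩
  have h2 : (L.drop k).drop w.length = L.drop (k + w.length) := by rw [List.drop_drop]
  rwa [← h2]

lemma pfx_get0 {L w : List Char} {k : Nat} (h : w <+: L.drop k) (hw : 0 < w.length) :
    L[k]? = some (w[0]'hw) := by
  have := pfx_get (i := 0) h hw
  simpa using this

-- two words starting at the same position agree on the first character
lemma first_char_clash {L : List Char} {k : Nat} {w : List Char} (hw0 : 0 < w.length)
    (hpre : w <+: L.drop k) {c : Char} (h0 : L[k]? = some c) (hne : w[0]'hw0 ≠ c) : False := by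
  have h1 := pfx_get0 hpre hw0
  rw [h0] at h1
  exact hne (Option.some.inj h1.symm)

lemma decomp_first_char {M : List Char} (h : Decomp M) (hne : M ≠ []) :
    M[0]? = some 'd' ∨ M[0]? = some 'e' := by
  obtain ⟨w, hw, hpre, _⟩ := decomp_head h hne
  simp only [pvWords, List.mem_cons, List.not_mem_nil, or_false] at hw
  have hpre' : w <+: M.drop 0 := by simpa using hpre
  rcases hw with rfl | rfl | rfl | rfl
  · left; simpa [dreamW] using pfx_get0 hpre' (by decide)
  · left; simpa [dreamerW] using pfx_get0 hpre' (by decide)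
  · right; simpa [eraseW] using pfx_get0 hpre' (by decide)
  · right; simpa [eraserW] using pfx_get0 hpre' (by decide)

lemma decomp_e {M : List Char} (h : Decomp M) (h0 : M[0]? = some 'e') :
    M[2]? = some 'a' ∧ 5 ≤ M.length := by
  have hne : M ≠ [] := by intro hM; rw [hM] at h0; simp at h0
  obtain ⟨w, hw, hpre, _⟩ := decomp_head h hne
  simp only [pvWords, List.mem_cons, List.not_mem_nil, or_false] at hw
  have hlen := hpre.length_le
  have hpre' : w <+: M.drop 0 := by simpa using hpre
  rcases hw with rfl | rfl | rfl | rfl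
  · exact absurd (first_char_clash (by decide) hpre' (by simpa using h0) (by decide)) (by simp)
  · exact absurd (first_char_clash (by decide) hpre' (by simpa using h0) (by decide)) (by simp)
  · refine ⟨?_, by simp [eraseW] at hlen; omega⟩
    have := pfx_get (i := 2) hpre' (show 2 < eraseW.length by decide)
    simpa [eraseW] using this
  · refine ⟨?_, by simp [eraserW] at hlen; omega⟩
    have := pfx_get (i := 2) hpre' (show 2 < eraserW.length by decide)
    simpa [eraserW] using this

lemma decomp_not_r {M : List Char} (h : Decomp M) (hne : M ≠ []) : ¬ M[0]? = some 'r' := by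
  rcases decomp_first_char h hne with h0 | h0 <;> (rw [h0]; simp)

-- isStStr characterization
lemma isStStr_iff (S : String) (k : Nat) (st : String) (hk : k ≤ S.toList.length) :
    isStStr S (S.toList.length : Int) (k : Int) st = true ↔ st.toList <+: S.toList.drop k := by
  unfold isStStr
  simp only [pysem]
  split_ifs with hg
  · simp only [false_iff]
    intro hp
    have h1 := hp.length_le
    rw [List.length_drop] at h1
    omega
  · rw [PySem.List.pyRange_zero_natCast, List.all_map, List.all_eq_true]
    rw [List.prefix_iff_getElem?]
    constructor
    · intro h i hi
      have hh := h i (List.mem_range.mpr hi)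
      simp only [Function.comp, beq_iff_eq] at hh
      have hc : ((k : Int) + i) = ((k + i : Nat) : Int) := by push_cast; ring
      rw [hc, PySem.List.pyGet?_natCast, PySem.List.pyGet?_natCast] at hh
      rw [List.getElem?_drop, hh]
      simp
    · intro h i hi
      have hi' := List.mem_range.mp hi
      simp only [Function.comp, beq_iff_eq]
      have hh := h i hi'
      rw [List.getElem?_drop] at hh
      have hc : ((k : Int) + i) = ((k + i : Nat) : Int) := by push_cast; ring
      rw [hc, PySem.List.pyGet?_natCast, PySem.List.pyGet?_natCast, hh]
      simp

-- A-side branch lemmas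
lemma bd_dream_noext {L : List Char} {k : Nat} (hd : dreamW <+: L.drop k)
    (hC : L.length < k + 7
        ∨ ¬(L[k+5]? = some 'e' ∧ L[k+6]? = some 'r')
        ∨ (k + 8 ≤ L.length ∧ L[k+7]? ≠ some 'e' ∧ L[k+7]? ≠ some 'd')) :
    (Decomp (L.drop (k+5)) ↔ Decomp (L.drop k)) := by
  obtain ⟨hsplit, hk5⟩ := drop_word (by decide) hd
  simp only [show dreamW.length = 5 from rfl] at hsplit hk5
  constructor
  · intro h
    rw [hsplit]
    exact Decomp.cons _ _ (by simp [pvWords]) h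
  · intro h
    have hne : L.drop k ≠ [] := by rw [hsplit]; simp [dreamW]
    obtain ⟨w, hw, hpre, hrest⟩ := decomp_head_at h hne
    have h0 : L[k]? = some 'd' := by
      simpa [dreamW] using pfx_get0 hd (by decide)
    simp only [pvWords, List.mem_cons, List.not_mem_nil, or_false] at hw
    rcases hw with rfl | rfl | rfl | rfl
    · simpa [dreamW] using hrest
    · -- w = dreamer: refute each disjunct of hC
      exfalso
      obtain ⟨_, hk7⟩ := drop_word (by decide) hpre
      simp only [show dreamerW.length = 7 from rfl] at hk7 hrest
      have h5 : L[k+5]? = some 'e' := by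
        have := pfx_get hpre (show 5 < dreamerW.length by decide); simpa [dreamerW] using this
      have h6 : L[k+6]? = some 'r' := by
        have := pfx_get hpre (show 6 < dreamerW.length by decide); simpa [dreamerW] using this
      rcases hC with hC | hC | ⟨hC1, hC2, hC3⟩
      · omega
      · exact hC ⟨h5, h6⟩
      · have hne7 : L.drop (k+7) ≠ [] := by
          intro hnil
          have := congrArg List.length hnil
          rw [List.length_drop] at this
          simp at this; omega
        have h7 := decomp_first_char hrest hne7
        rw [List.getElem?_drop] at h7
        simp only [Nat.add_zero] at h7
        rcases h7 with h7 | h7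
        · exact hC3 h7
        · exact hC2 h7
    · exact absurd (first_char_clash (w := eraseW) (by decide) hpre h0 (by decide)) (by simp)
    · exact absurd (first_char_clash (w := eraserW) (by decide) hpre h0 (by decide)) (by simp)

lemma bd_dream_ext {L : List Char} {k : Nat} (hd : dreamW <+: L.drop k)
    (h5 : L[k+5]? = some 'e') (h6 : L[k+6]? = some 'r')
    (hC : L.length < k + 8 ∨ L[k+7]? = some 'e' ∨ L[k+7]? = some 'd') :
    (Decomp (L.drop (k+7)) ↔ Decomp (L.drop k)) := by
  have hder : dreamerW <+: L.drop k := by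
    have s1 : (dreamW ++ ['e']) <+: L.drop k :=
      snoc_prefix hd (by simpa [show dreamW.length = 5 from rfl] using h5)
    have s2 : ((dreamW ++ ['e']) ++ ['r']) <+: L.drop k :=
      snoc_prefix s1 (by simpa [show (dreamW ++ ['e']).length = 6 from rfl] using h6)
    simpa [show (dreamW ++ ['e']) ++ ['r'] = dreamerW from rfl] using s2
  obtain ⟨hsplit, hk7⟩ := drop_word (by decide) hder
  simp only [show dreamerW.length = 7 from rfl] at hsplit hk7
  constructor
  · intro h
    rw [hsplit]
    exact Decomp.cons _ _ (by simp [pvWords]) h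
  · intro h
    have hne : L.drop k ≠ [] := by rw [hsplit]; simp [dreamerW]
    obtain ⟨w, hw, hpre, hrest⟩ := decomp_head_at h hne
    have h0 : L[k]? = some 'd' := by
      simpa [dreamW] using pfx_get0 hd (by decide)
    simp only [pvWords, List.mem_cons, List.not_mem_nil, or_false] at hw
    rcases hw with rfl | rfl | rfl | rfl
    · -- w = dream: the remainder starts 'e', so it starts erase/eraser, so L[k+7] = 'a': refute hC
      exfalso
      simp only [show dreamW.length = 5 from rfl] at hrest
      have h5' : (L.drop (k+5))[0]? = some 'e' := by
        rw [List.getElem?_drop]; simpa using h5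
      obtain ⟨ha, hlen5⟩ := decomp_e hrest h5'
      rw [List.getElem?_drop] at ha
      rw [List.length_drop] at hlen5
      rcases hC with hC | hC | hC
      · omega
      · rw [show k+5+2 = k+7 from rfl] at ha; rw [hC] at ha; simp at ha
      · rw [show k+5+2 = k+7 from rfl] at ha; rw [hC] at ha; simp at ha
    · simpa [show dreamerW.length = 7 from rfl] using hrest
    · exact absurd (first_char_clash (w := eraseW) (by decide) hpre h0 (by decide)) (by simp)
    · exact absurd (first_char_clash (w := eraserW) (by decide) hpre h0 (by decide)) (by simp)

lemma bd_erase_nor {L : List Char} {k : Nat} (he : eraseW <+: L.drop k)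
    (hC : L.length < k + 6 ∨ ¬ L[k+5]? = some 'r') :
    (Decomp (L.drop (k+5)) ↔ Decomp (L.drop k)) := by
  obtain ⟨hsplit, hk5⟩ := drop_word (by decide) he
  simp only [show eraseW.length = 5 from rfl] at hsplit hk5
  constructor
  · intro h
    rw [hsplit]
    exact Decomp.cons _ _ (by simp [pvWords]) h
  · intro h
    have hne : L.drop k ≠ [] := by rw [hsplit]; simp [eraseW]
    obtain ⟨w, hw, hpre, hrest⟩ := decomp_head_at h hne
    have h0 : L[k]? = some 'e' := by
      simpa [eraseW] using pfx_get0 he (by decide)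
    simp only [pvWords, List.mem_cons, List.not_mem_nil, or_false] at hw
    rcases hw with rfl | rfl | rfl | rfl
    · exact absurd (first_char_clash (w := dreamW) (by decide) hpre h0 (by decide)) (by simp)
    · exact absurd (first_char_clash (w := dreamerW) (by decide) hpre h0 (by decide)) (by simp)
    · simpa [show eraseW.length = 5 from rfl] using hrest
    · exfalso
      obtain ⟨_, hk6⟩ := drop_word (by decide) hpre
      simp only [show eraserW.length = 6 from rfl] at hk6
      have h5 : L[k+5]? = some 'r' := by
        have := pfx_get hpre (show 5 < eraserW.length by decide); simpa [eraserW] using this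
      rcases hC with hC | hC
      · omega
      · exact hC h5

lemma bd_eraser {L : List Char} {k : Nat} (he : eraseW <+: L.drop k)
    (h5 : L[k+5]? = some 'r') :
    (Decomp (L.drop (k+6)) ↔ Decomp (L.drop k)) := by
  have her : eraserW <+: L.drop k := by
    have s1 : (eraseW ++ ['r']) <+: L.drop k :=
      snoc_prefix he (by simpa [show eraseW.length = 5 from rfl] using h5)
    simpa [show eraseW ++ ['r'] = eraserW from rfl] using s1
  obtain ⟨hsplit, hk6⟩ := drop_word (by decide) her
  simp only [show eraserW.length = 6 from rfl] at hsplit hk6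
  constructor
  · intro h
    rw [hsplit]
    exact Decomp.cons _ _ (by simp [pvWords]) h
  · intro h
    have hne : L.drop k ≠ [] := by rw [hsplit]; simp [eraserW]
    obtain ⟨w, hw, hpre, hrest⟩ := decomp_head_at h hne
    have h0 : L[k]? = some 'e' := by
      simpa [eraseW] using pfx_get0 he (by decide)
    simp only [pvWords, List.mem_cons, List.not_mem_nil, or_false] at hw
    rcases hw with rfl | rfl | rfl | rfl
    · exact absurd (first_char_clash (w := dreamW) (by decide) hpre h0 (by decide)) (by simp)
    · exact absurd (first_char_clash (w := dreamerW) (by decide) hpre h0 (by decide)) (by simp)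
    · -- w = erase: remainder starts with 'r', impossible
      exfalso
      simp only [show eraseW.length = 5 from rfl] at hrest
      have hne5 : L.drop (k+5) ≠ [] := by
        obtain ⟨hlt5, -⟩ := List.getElem?_eq_some_iff.mp h5
        intro hnil
        have := congrArg List.length hnil
        rw [List.length_drop] at this
        simp at this; omega
      apply decomp_not_r hrest hne5
      rw [List.getElem?_drop]
      simpa using h5
    · simpa [show eraserW.length = 6 from rfl] using hrest

lemma bd_none {L : List Char} {k : Nat} (hk : k < L.length)
    (hnd : ¬ dreamW <+: L.drop k) (hne : ¬ eraseW <+: L.drop k) :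
    ¬ Decomp (L.drop k) := by
  intro h
  have hnn : L.drop k ≠ [] := by
    intro hnil
    have := congrArg List.length hnil
    rw [List.length_drop] at this
    simp at this; omega
  obtain ⟨w, hw, hpre, _⟩ := decomp_head h hnn
  simp only [pvWords, List.mem_cons, List.not_mem_nil, or_false] at hw
  rcases hw with rfl | rfl | rfl | rfl
  · exact hnd hpre
  · exact hnd ((show dreamW <+: dreamerW by decide).trans hpre)
  · exact hne hpre
  · exact hne ((show eraseW <+: eraserW by decide).trans hpre)

-- the A-loop computes decomposability of the remaining suffix
lemma calcLoop_iff (S : String) : ∀ n k, k ≤ S.toList.length → S.toList.length - k = n →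
    (calcLoop S (S.toList.length : Int) (k : Int) = "YES" ↔ Decomp (S.toList.drop k)) := by
  intro n
  induction n using Nat.strong_induction_on with
  | _ n IH =>
    intro k hk hn
    rw [calcLoop]
    by_cases hlt : k < S.toList.length
    · rw [dif_pos (by exact_mod_cast hlt)]
      by_cases hd : isStStr S (S.toList.length : Int) (k : Int) "dream" = true
      · rw [if_pos hd]
        replace hd : dreamW <+: S.toList.drop k := by
          have := (isStStr_iff S k "dream" hk).mp hd
          simpa [show "dream".toList = dreamW from by decide] using this
        obtain ⟨_, hk5⟩ := drop_word (by decide) hd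
        simp only [show dreamW.length = 5 from rfl] at hk5
        split_ifs with c1 c2 c3 c4
        · -- consume "er": k+7
          have c1' : k + 7 ≤ S.toList.length := by omega
          rw [show ((k : Int) + 5 + 2) = ((k + 7 : Nat) : Int) by push_cast; ring]
          rw [IH (S.toList.length - (k+7)) (by omega) (k+7) (by omega) rfl]
          rw [show ((k : Int) + 5) = ((k + 5 : Nat) : Int) by push_cast; ring,
              show (((k + 5 : Nat) : Int) + 1) = ((k + 6 : Nat) : Int) by push_cast; ring] at c2
          simp only [PySem.Str.pyGet?_natCast, Bool.and_eq_true, beq_iff_eq] at c2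
          rw [show ((k : Int) + 5 + 2) = ((k + 7 : Nat) : Int) by push_cast; ring] at c4
          simp only [PySem.Str.pyGet?_natCast, Bool.or_eq_true, beq_iff_eq] at c4
          exact bd_dream_ext hd c2.1 c2.2 (Or.inr c4)
        · -- third char exists but is not e/d: stay at k+5
          rw [show ((k : Int) + 5) = ((k + 5 : Nat) : Int) by push_cast; ring]
          rw [IH (S.toList.length - (k+5)) (by omega) (k+5) (by omega) rfl]
          rw [show ((k : Int) + 5 + 2) = ((k + 7 : Nat) : Int) by push_cast; ring] at c4
          simp only [PySem.Str.pyGet?_natCast, Bool.or_eq_true, beq_iff_eq] at c4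
          push_neg at c4
          exact bd_dream_noext hd (Or.inr (Or.inr ⟨by omega, c4.1, c4.2⟩))
        · -- string ends right after "er": consume it, k+7
          have c1' : k + 7 ≤ S.toList.length := by omega
          rw [show ((k : Int) + 5 + 2) = ((k + 7 : Nat) : Int) by push_cast; ring]
          rw [IH (S.toList.length - (k+7)) (by omega) (k+7) (by omega) rfl]
          rw [show ((k : Int) + 5) = ((k + 5 : Nat) : Int) by push_cast; ring,
              show (((k + 5 : Nat) : Int) + 1) = ((k + 6 : Nat) : Int) by push_cast; ring] at c2
          simp only [PySem.Str.pyGet?_natCast, Bool.and_eq_true, beq_iff_eq] at c2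
          exact bd_dream_ext hd c2.1 c2.2 (Or.inl (by omega))
        · -- no "er" after dream
          rw [show ((k : Int) + 5) = ((k + 5 : Nat) : Int) by push_cast; ring]
          rw [IH (S.toList.length - (k+5)) (by omega) (k+5) (by omega) rfl]
          rw [show ((k : Int) + 5) = ((k + 5 : Nat) : Int) by push_cast; ring,
              show (((k + 5 : Nat) : Int) + 1) = ((k + 6 : Nat) : Int) by push_cast; ring] at c2
          simp only [PySem.Str.pyGet?_natCast, Bool.and_eq_true, beq_iff_eq] at c2
          push_neg at c2
          refine bd_dream_noext hd (Or.inr (Or.inl ?_))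
          intro ⟨h5, h6⟩
          exact (c2 h5) h6
        · -- too short for "er"
          rw [show ((k : Int) + 5) = ((k + 5 : Nat) : Int) by push_cast; ring]
          rw [IH (S.toList.length - (k+5)) (by omega) (k+5) (by omega) rfl]
          exact bd_dream_noext hd (Or.inl (by omega))
      · rw [if_neg hd]
        by_cases he : isStStr S (S.toList.length : Int) (k : Int) "erase" = true
        · rw [if_pos he]
          replace he : eraseW <+: S.toList.drop k := by
            have := (isStStr_iff S k "erase" hk).mp he
            simpa [show "erase".toList = eraseW from by decide] using this
          obtain ⟨_, hk5⟩ := drop_word (by decide) he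
          simp only [show eraseW.length = 5 from rfl] at hk5
          split_ifs with c1 c2
          · -- consume 'r': k+6
            rw [show ((k : Int) + 5 + 1) = ((k + 6 : Nat) : Int) by push_cast; ring]
            rw [IH (S.toList.length - (k+6)) (by omega) (k+6) (by omega) rfl]
            rw [show ((k : Int) + 5) = ((k + 5 : Nat) : Int) by push_cast; ring] at c2
            simp only [PySem.Str.pyGet?_natCast, beq_iff_eq] at c2
            exact bd_eraser he c2
          · rw [show ((k : Int) + 5) = ((k + 5 : Nat) : Int) by push_cast; ring]
            rw [IH (S.toList.length - (k+5)) (by omega) (k+5) (by omega) rfl]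
            rw [show ((k : Int) + 5) = ((k + 5 : Nat) : Int) by push_cast; ring] at c2
            simp only [PySem.Str.pyGet?_natCast, beq_iff_eq] at c2
            exact bd_erase_nor he (Or.inr c2)
          · rw [show ((k : Int) + 5) = ((k + 5 : Nat) : Int) by push_cast; ring]
            rw [IH (S.toList.length - (k+5)) (by omega) (k+5) (by omega) rfl]
            exact bd_erase_nor he (Or.inl (by omega))
        · rw [if_neg he]
          replace hd : ¬ dreamW <+: S.toList.drop k := by
            intro hc
            exact hd ((isStStr_iff S k "dream" hk).mpr
              (by simpa [show "dream".toList = dreamW from by decide] using hc))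
          replace he : ¬ eraseW <+: S.toList.drop k := by
            intro hc
            exact he ((isStStr_iff S k "erase" hk).mpr
              (by simpa [show "erase".toList = eraseW from by decide] using hc))
          simp only [show ("NO" : String) = "YES" ↔ False by simp, false_iff]
          exact bd_none hlt hd he
    · rw [dif_neg (by exact_mod_cast hlt)]
      have hke : k = S.toList.length := by omega
      subst hke
      simp only [List.drop_length]
      constructor
      · exact fun _ => Decomp.nil
      · exact fun _ => by trivial

lemma calcLoop_cases (S : String) (SL idx : Int) :
    calcLoop S SL idx = "YES" ∨ calcLoop S SL idx = "NO" := by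
  fun_induction calcLoop with
  | _ => simp_all

-- B-side: the reverse greedy computes decomposability of the reverse
lemma bLoop_step {t v : List Char} (hv : v.reverse ∈ pvWords) (hpre : v <+: t) (hvne : v ≠ []) :
    (Decomp (t.drop v.length).reverse ↔ Decomp t.reverse) := by
  obtain ⟨hsplit, -⟩ := drop_word (L := t) (k := 0) hvne (by simpa using hpre)
  simp only [List.drop_zero, Nat.zero_add] at hsplit
  constructor
  · intro h
    rw [hsplit, List.reverse_append]
    exact decomp_append_word _ _ hv h
  · intro h
    have htne : t ≠ [] := by
      intro hnil; subst hnil; exact hvne (List.prefix_nil.mp hpre)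
    obtain ⟨X, w, hw, hX, hdX⟩ := decomp_rev_inversion t.reverse h (by simpa using htne)
    have ht : t = w.reverse ++ X.reverse := by
      have := congrArg List.reverse hX
      simpa using this
    have hwpre : w.reverse <+: t := ht ▸ List.prefix_append _ _
    have hor := List.prefix_or_prefix_of_prefix hpre hwpre
    -- the reversed words form a prefix code, so the matched prefix is forced
    have hveq : v = w.reverse := by
      simp only [pvWords, List.mem_cons, List.not_mem_nil, or_false] at hv hw
      have hvv : v = dreamW.reverse ∨ v = dreamerW.reverse ∨ v = eraseW.reverse ∨ v = eraserW.reverse := by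
        rcases hv with hv | hv | hv | hv
        · exact Or.inl (by rw [← hv]; simp)
        · exact Or.inr (Or.inl (by rw [← hv]; simp))
        · exact Or.inr (Or.inr (Or.inl (by rw [← hv]; simp)))
        · exact Or.inr (Or.inr (Or.inr (by rw [← hv]; simp)))
      rcases hw with rfl | rfl | rfl | rfl <;>
        rcases hvv with rfl | rfl | rfl | rfl <;>
          first
            | rfl
            | (exfalso; revert hor; decide)
    subst hveq
    have hXrev : t.drop w.reverse.length = X.reverse := by
      rw [ht, List.drop_left]
    rw [hXrev]
    simpa using hdX

lemma bLoop_iff (t : List Char) : bLoop t = "YES" ↔ Decomp t.reverse := by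
  fun_induction bLoop with
  | case1 =>
    simp only [List.reverse_nil]
    constructor
    · exact fun _ => Decomp.nil
    · exact fun _ => by trivial
  | case2 t h hs IH =>
    rw [IH]
    have hpre : "resare".toList <+: t := (PySem.Chars.startswith_iff t _).mp hs
    have := bLoop_step (t := t) (v := "resare".toList) (by decide) hpre (by decide)
    simpa using this
  | case3 t h _ hs IH =>
    rw [IH]
    have hpre : "remaerd".toList <+: t := (PySem.Chars.startswith_iff t _).mp hs
    have := bLoop_step (t := t) (v := "remaerd".toList) (by decide) hpre (by decide)
    simpa using this
  | case4 t h _ _ hs IH =>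
    rw [IH]
    have hpre : "esare".toList <+: t := (PySem.Chars.startswith_iff t _).mp hs
    have := bLoop_step (t := t) (v := "esare".toList) (by decide) hpre (by decide)
    simpa using this
  | case5 t h _ _ _ hs IH =>
    rw [IH]
    have hpre : "maerd".toList <+: t := (PySem.Chars.startswith_iff t _).mp hs
    have := bLoop_step (t := t) (v := "maerd".toList) (by decide) hpre (by decide)
    simpa using this
  | case6 t h h1 h2 h3 h4 =>
    simp only [show ("NO" : String) = "YES" ↔ False by simp, false_iff]
    intro hD
    obtain ⟨X, w, hw, hX, -⟩ := decomp_rev_inversion t.reverse hD (by simpa using h)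
    have ht : t = w.reverse ++ X.reverse := by
      have := congrArg List.reverse hX
      simpa using this
    have hwpre : w.reverse <+: t := ht ▸ List.prefix_append _ _
    simp only [pvWords, List.mem_cons, List.not_mem_nil, or_false] at hw
    rcases hw with rfl | rfl | rfl | rfl
    · exact h4 ((PySem.Chars.startswith_iff t _).mpr
        (by rw [show ("maerd".toList : List Char) = dreamW.reverse from by decide]; exact hwpre))
    · exact h2 ((PySem.Chars.startswith_iff t _).mpr
        (by rw [show ("remaerd".toList : List Char) = dreamerW.reverse from by decide]; exact hwpre))
    · exact h3 ((PySem.Chars.startswith_iff t _).mpr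
        (by rw [show ("esare".toList : List Char) = eraseW.reverse from by decide]; exact hwpre))
    · exact h1 ((PySem.Chars.startswith_iff t _).mpr
        (by rw [show ("resare".toList : List Char) = eraserW.reverse from by decide]; exact hwpre))

lemma bLoop_cases (t : List Char) : bLoop t = "YES" ∨ bLoop t = "NO" := by
  fun_induction bLoop with
  | _ => simp_all

-- ===== VERDICT (by name: the statement is the Claim_ definition above) =====
theorem calc_py_spec : Claim_equal_calc_py := by
  intro S _
  unfold Spec_calc_py calc_py calc_py_alt
  have hs : PySem.List.slice? S.toList none none (-1) = some S.toList.reverse := by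
    simp [pysem]
  rw [hs]
  have hA := calcLoop_iff S (S.toList.length - 0) 0 (Nat.zero_le _) rfl
  have hB := bLoop_iff S.toList.reverse
  simp only [Nat.cast_zero, List.drop_zero, List.reverse_reverse] at hA hB
  have hlen : PySem.Str.len S = (S.toList.length : Int) := by simp [pysem]
  rw [hlen]
  rcases calcLoop_cases S (S.toList.length : Int) 0 with h | h <;>
    rcases bLoop_cases S.toList.reverse with h' | h' <;>
      simp_all
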